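-- pv_equiv track=rewrite | github.com/mnstupichev/algorithm_and_data_structures | lab5/task4/src/solution.py | heap_executing
-- ===== SOURCE A (Python) =====
-- from typing import List, Tuple
--
-- def min_heapify(array: List[int], array_len: int, cur_ind: int, swaps: List[Tuple[int, int]]) -> List[Tuple[int, int]]:
--     least = cur_ind
--     left = 2 * cur_ind + 1
--     right = 2 * cur_ind + 2
--
--     if left < array_len and array[least] > array[left]:
--         least = left
--
--     if right < array_len and array[least] > array[right]:
--         least = right
--
--     if least != cur_ind:
--         array[cur_ind], array[least] = array[least], array[cur_ind]
--         swaps.append((cur_ind, least))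
--
--         min_heapify(array, array_len, least, swaps)
--
--     return swaps
--
-- def heap_executing(array: List[int]) -> List[Tuple[int, int]]:
--     n = len(array)
--     m, swaps = 0, []
--     for i in range(n // 2, -1, -1):
--         cur_swaps = min_heapify(array, n, i, [])
--         for swap in cur_swaps:
--             swaps.append(swap)
--
--     return swaps
-- ===== SOURCE B (Python) =====
-- from typing import List, Tuple
--
-- def heap_executing(array: List[int]) -> List[Tuple[int, int]]:
--     # Heapify by the "hole" method: the sifted value is held aside, smaller
--     # children are moved up into the hole, and the value is written once at
--     # the end; the recorded (parent, child) pairs are the hole's path.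
--     n = len(array)
--     if n < 2:
--         return []
--     swaps = []
--     for start in reversed(range(n // 2 + 1)):
--         hole = start
--         v = array[hole]
--         while 2 * hole + 1 < n:
--             child = 2 * hole + 1
--             if child + 1 < n and array[child + 1] < array[child]:
--                 child += 1
--             if array[child] >= v:
--                 break
--             array[hole] = array[child]
--             swaps.append((hole, child))
--             hole = child
--         array[hole] = v
--     return swaps
-- ===== Notes on version B (the rewrite author's own statement) =====
-- stated objective: alternative
-- what changed: Replaced A's recursive min_heapify (pairwise swaps, a fresh swap list per top-level call copied into the result) by an iterative hole-style sift-down that holds the sifted value aside, moves the smaller child up into the hole each step, writes the value once at the end, and appends each recorded pair to a single accumulator.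
import Mathlib
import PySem

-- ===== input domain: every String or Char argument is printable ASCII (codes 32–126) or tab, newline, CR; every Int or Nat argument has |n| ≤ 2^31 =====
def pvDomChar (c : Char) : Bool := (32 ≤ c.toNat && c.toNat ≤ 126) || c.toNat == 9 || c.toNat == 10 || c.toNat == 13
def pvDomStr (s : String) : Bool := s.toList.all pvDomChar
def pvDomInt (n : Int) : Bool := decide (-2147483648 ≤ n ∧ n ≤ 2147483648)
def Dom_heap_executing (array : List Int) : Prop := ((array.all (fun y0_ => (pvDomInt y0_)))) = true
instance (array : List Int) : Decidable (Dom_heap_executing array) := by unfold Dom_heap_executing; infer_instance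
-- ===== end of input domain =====

-- B heapifies by the "hole" method (sifted value held aside, smaller children moved up,
-- one final write) instead of A's recursive min_heapify with pairwise swaps and per-call
-- swap lists; same recorded swap sequence ("alternative" objective, same asymptotics).
-- Both Pythons mutate `array` in place identically; the theorem is about the returned
-- swap list (the ports thread the list state explicitly).

-- ===== PORT A =====
-- fuel only makes the recursion total; A's calls always terminate before fuel runs out.
-- All array accesses A performs are in range, so `.getD 0` is never the value used.
def minHeapifyA : Nat → List Int → Int → Int → List (Int × Int) → List Int × List (Int × Int)
  | 0, array, _, _, swaps => (array, swaps)
  | fuel + 1, array, array_len, cur_ind, swaps =>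
    let least := cur_ind
    let left := 2 * cur_ind + 1
    let right := 2 * cur_ind + 2
    let least := if left < array_len ∧ (PySem.List.pyGetD array least 0) > (PySem.List.pyGetD array left 0) then left else least
    let least := if right < array_len ∧ (PySem.List.pyGetD array least 0) > (PySem.List.pyGetD array right 0) then right else least
    if least ≠ cur_ind then
      let array := PySem.List.pySetD (PySem.List.pySetD array cur_ind (PySem.List.pyGetD array least 0)) least (PySem.List.pyGetD array cur_ind 0)
      minHeapifyA fuel array array_len least (swaps ++ [(cur_ind, least)])
    else (array, swaps)

def heap_executing (array : List Int) : List (Int × Int) :=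
  let n : Int := array.length
  ((PySem.List.pyRange (PySem.Int.floordiv n 2) (-1) (-1)).foldl
    (fun (st : List Int × List (Int × Int)) i =>
      let cur := minHeapifyA (array.length + 1) st.1 n i []
      (cur.1, st.2 ++ cur.2))
    (array, [])).2

-- ===== PORT B =====
-- Iterative hole sift-down: `v` is the value being sifted, `hole` its current slot;
-- the smaller child is copied up into the hole and `v` is written once at the end.
-- fuel only makes the while-loop total; B's loop always breaks before fuel runs out.
def siftHole : Nat → List Int → Nat → Nat → Int → List Int × List (Nat × Nat)
  | 0, a, _, hole, v => (a.set hole v, [])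
  | fuel + 1, a, n, hole, v =>
    if 2 * hole + 1 < n then
      let c0 := 2 * hole + 1
      let child := if c0 + 1 < n ∧ a.getD (c0 + 1) 0 < a.getD c0 0 then c0 + 1 else c0
      if a.getD child 0 ≥ v then (a.set hole v, [])
      else
        let r := siftHole fuel (a.set hole (a.getD child 0)) n child v
        (r.1, (hole, child) :: r.2)
    else (a.set hole v, [])

def heap_executing_alt (array : List Int) : List (Int × Int) :=
  let n := array.length
  if n < 2 then []
  else
    (((List.range (n / 2 + 1)).reverse).foldl
      (fun (st : List Int × List (Int × Int)) start =>
        let r := siftHole (n + 1) st.1 n start (st.1.getD start 0)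
        (r.1, st.2 ++ r.2.map (fun p => ((p.1 : Int), (p.2 : Int)))))
      (array, [])).2

-- ===== PRECONDITION & SPEC =====
def Spec_heap_executing (array : List Int) (out : List (Int × Int)) : Prop := out = heap_executing_alt array
instance (array : List Int) (out : List (Int × Int)) : Decidable (Spec_heap_executing array out) := by unfold Spec_heap_executing; infer_instance

-- ===== CLAIM (what is proved, stated in full; the proofs are below) =====
def Claim_equal_heap_executing : Prop := ∀ (array : List Int), Dom_heap_executing array → Spec_heap_executing array (heap_executing array)

-- ===== LEMMAS AND PROOFS =====

theorem getD_set_ne (a : List Int) (i j : Nat) (v : Int) (h : i ≠ j) :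
    (a.set i v).getD j 0 = a.getD j 0 := by
  simp [List.getD, h]

theorem getD_set_self (a : List Int) (i : Nat) (v : Int) (h : i < a.length) :
    (a.set i v).getD i 0 = v := by
  simp [List.getD, h]

theorem set_getD_self (a : List Int) (i : Nat) (h : i < a.length) :
    a.set i (a.getD i 0) = a := by
  rw [List.getD_eq_getElem a 0 h]; exact List.set_getElem_self h

theorem siftHole_length (fuel : Nat) :
    ∀ (a : List Int) (n hole : Nat) (v : Int),
      (siftHole fuel a n hole v).1.length = a.length := by
  induction fuel with
  | zero => intro a n hole v; simp [siftHole]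
  | succ fuel ih =>
    intro a n hole v
    simp only [siftHole]
    split_ifs <;> simp [ih]

-- The heart: A's recursive swapping sift from `hole` over the array `a.set hole v`
-- performs exactly the steps of B's hole sift of `v` through `a`, and records the
-- same pairs (cast Nat → Int).  `a.length ≤ fuel + hole` keeps fuel from running out.
theorem sift_eq (fuel : Nat) :
    ∀ (a : List Int) (hole : Nat) (v : Int) (s : List (Int × Int)),
      hole < a.length → a.length ≤ fuel + hole →
      minHeapifyA fuel (a.set hole v) (a.length : Int) (hole : Int) s
        = ((siftHole fuel a a.length hole v).1,
           s ++ (siftHole fuel a a.length hole v).2.map (fun p => ((p.1 : Int), (p.2 : Int)))) := by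
  induction fuel with
  | zero => intro a hole v s h1 h2; omega
  | succ fuel ih =>
    intro a hole v s h1 h2
    have e1 : (2 * (hole : Int) + 1) = ((2 * hole + 1 : Nat) : Int) := by push_cast; ring
    have e2 : (2 * (hole : Int) + 2) = ((2 * hole + 2 : Nat) : Int) := by push_cast; ring
    have e3 : 2 * hole + 1 + 1 = 2 * hole + 2 := by omega
    have hv : (a.set hole v).getD hole 0 = v := getD_set_self a hole v h1
    have hLv : (a.set hole v).getD (2 * hole + 1) 0 = a.getD (2 * hole + 1) 0 :=
      getD_set_ne a hole (2 * hole + 1) v (by omega)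
    have hRv : (a.set hole v).getD (2 * hole + 2) 0 = a.getD (2 * hole + 2) 0 :=
      getD_set_ne a hole (2 * hole + 2) v (by omega)
    simp only [minHeapifyA, siftHole, e1, e2, e3, PySem.List.pyGetD_natCast,
      PySem.List.pySetD_natCast, hv, hLv, hRv]
    by_cases hc1 : ((2 * hole + 1 : Nat) : Int) < (a.length : Int) ∧ v > a.getD (2 * hole + 1) 0
    · -- A takes the left child first
      have hL : 2 * hole + 1 < a.length := by omega
      simp only [if_pos hc1, if_pos hL, PySem.List.pyGetD_natCast, hLv]
      by_cases hc2 : ((2 * hole + 2 : Nat) : Int) < (a.length : Int) ∧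
          a.getD (2 * hole + 1) 0 > a.getD (2 * hole + 2) 0
      · -- …then moves to the right child: both sides swap with the right child
        have hR : 2 * hole + 2 < a.length := by omega
        simp only [if_pos hc2, if_pos (show 2 * hole + 2 < a.length ∧
          a.getD (2 * hole + 2) 0 < a.getD (2 * hole + 1) 0 from ⟨hR, hc2.2⟩),
          PySem.List.pyGetD_natCast, PySem.List.pySetD_natCast, hRv, List.set_set]
        rw [if_pos (show ((2 * hole + 2 : Nat) : Int) ≠ (hole : Int) by omega),
            if_neg (show ¬ a.getD (2 * hole + 2) 0 ≥ v by omega)]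
        have hrec := ih (a.set hole (a.getD (2 * hole + 2) 0)) (2 * hole + 2) v
          (s ++ [((hole : Int), ((2 * hole + 2 : Nat) : Int))])
          (by simpa using hR) (by simp; omega)
        simp only [List.length_set] at hrec
        rw [hrec]
        simp
      · -- …and stays at the left child: both sides swap with the left child
        simp only [if_neg hc2, if_neg (show ¬ (2 * hole + 2 < a.length ∧
          a.getD (2 * hole + 2) 0 < a.getD (2 * hole + 1) 0) by
            intro h; exact hc2 ⟨by omega, h.2⟩),
          PySem.List.pyGetD_natCast, PySem.List.pySetD_natCast, hLv, List.set_set]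
        rw [if_pos (show ((2 * hole + 1 : Nat) : Int) ≠ (hole : Int) by omega),
            if_neg (show ¬ a.getD (2 * hole + 1) 0 ≥ v by omega)]
        have hrec := ih (a.set hole (a.getD (2 * hole + 1) 0)) (2 * hole + 1) v
          (s ++ [((hole : Int), ((2 * hole + 1 : Nat) : Int))])
          (by simpa using hL) (by simp; omega)
        simp only [List.length_set] at hrec
        rw [hrec]
        simp
    · -- left child not smaller (or absent): A's `least` is still `hole` after the first test
      simp only [if_neg hc1, PySem.List.pyGetD_natCast, hv]
      by_cases hc2 : ((2 * hole + 2 : Nat) : Int) < (a.length : Int) ∧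
          v > a.getD (2 * hole + 2) 0
      · -- right child is smaller than v: both sides swap with the right child
        have hR : 2 * hole + 2 < a.length := by omega
        have hL : 2 * hole + 1 < a.length := by omega
        have hALv : a.getD (2 * hole + 2) 0 < a.getD (2 * hole + 1) 0 := by omega
        simp only [if_pos hc2, if_pos hL, if_pos (show 2 * hole + 2 < a.length ∧
            a.getD (2 * hole + 2) 0 < a.getD (2 * hole + 1) 0 from ⟨hR, hALv⟩),
          PySem.List.pyGetD_natCast, PySem.List.pySetD_natCast, hRv, List.set_set]
        rw [if_pos (show ((2 * hole + 2 : Nat) : Int) ≠ (hole : Int) by omega),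
            if_neg (show ¬ a.getD (2 * hole + 2) 0 ≥ v by omega)]
        have hrec := ih (a.set hole (a.getD (2 * hole + 2) 0)) (2 * hole + 2) v
          (s ++ [((hole : Int), ((2 * hole + 2 : Nat) : Int))])
          (by simpa using hR) (by simp; omega)
        simp only [List.length_set] at hrec
        rw [hrec]
        simp
      · -- no swap on either side
        rw [if_neg hc2, if_neg (show ¬ ((hole : Int) ≠ (hole : Int)) by omega)]
        by_cases hL : 2 * hole + 1 < a.length
        · rw [if_pos hL]
          by_cases hcB : 2 * hole + 2 < a.length ∧
              a.getD (2 * hole + 2) 0 < a.getD (2 * hole + 1) 0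
          · rw [if_pos hcB, if_pos (show a.getD (2 * hole + 2) 0 ≥ v by omega)]
            simp
          · rw [if_neg hcB, if_pos (show a.getD (2 * hole + 1) 0 ≥ v by omega)]
            simp
        · rw [if_neg hL]
          simp

-- Outer loop correspondence: folding A's step over [m/2, …, 0] equals folding B's step.
theorem fold_core (l : List Nat) :
    ∀ (arr : List Int) (s : List (Int × Int)) (m : Nat),
      arr.length = m → 1 ≤ m → (∀ x ∈ l, x ≤ m / 2) →
      l.foldl (fun (st : List Int × List (Int × Int)) (x : Nat) =>
          ((minHeapifyA (m + 1) st.1 (m : Int) (x : Int) []).1,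
           st.2 ++ (minHeapifyA (m + 1) st.1 (m : Int) (x : Int) []).2)) (arr, s)
        = l.foldl (fun (st : List Int × List (Int × Int)) (x : Nat) =>
            ((siftHole (m + 1) st.1 m x (st.1.getD x 0)).1,
             st.2 ++ (siftHole (m + 1) st.1 m x (st.1.getD x 0)).2.map
               (fun p => ((p.1 : Int), (p.2 : Int))))) (arr, s) := by
  induction l with
  | nil => intro arr s m _ _ _; rfl
  | cons x l ih =>
    intro arr s m hlen hm hmem
    have hx : x < arr.length := by
      have := hmem x (List.mem_cons_self); omega
    have hfuel : arr.length ≤ (m + 1) + x := by omega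
    have hstep := sift_eq (m + 1) arr x (arr.getD x 0) [] hx hfuel
    rw [set_getD_self arr x hx] at hstep
    rw [hlen] at hstep
    simp only [List.foldl_cons, hstep, List.nil_append]
    exact ih _ _ m (by rw [siftHole_length, hlen]) hm
      (fun y hy => hmem y (List.mem_cons_of_mem _ hy))

-- pyRange m (-1) (-1) is [m, …, 0], i.e. (range (m+1)).reverse cast to Int.
theorem pyRange_countdown (m : Nat) :
    PySem.List.pyRange (m : Int) (-1) (-1)
      = ((List.range (m + 1)).reverse).map (fun x : Nat => (x : Int)) := by
  induction m with
  | zero => decide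
  | succ m ih =>
    rw [PySem.List.pyRange_neg_one_cons (by omega)]
    have e : ((m + 1 : Nat) : Int) - 1 = (m : Int) := by push_cast; ring
    rw [e, ih]
    conv_rhs => rw [List.range_succ]
    simp

-- ===== VERDICT (by name: the statement is the Claim_ definition above) =====
theorem heap_executing_spec : Claim_equal_heap_executing := by
  intro array _
  simp only [Spec_heap_executing, heap_executing, heap_executing_alt]
  by_cases hn : array.length < 2
  · rw [if_pos hn]
    rcases array with _ | ⟨x, _ | ⟨y, t⟩⟩
    · rfl
    · rfl
    · exfalso; simp [List.length] at hn
  · have hm : 1 ≤ array.length := by omega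
    have hfd : PySem.Int.floordiv (array.length : Int) 2 = ((array.length / 2 : Nat) : Int) := by
      rw [PySem.Int.floordiv_eq_ediv_of_pos (by omega)]; omega
    simp only [hfd, pyRange_countdown, List.foldl_map, if_neg hn]
    rw [fold_core _ array [] array.length rfl hm
      (fun x hx => by simp only [List.mem_reverse, List.mem_range] at hx; omega)]
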